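-- pv_equiv track=rewrite | github.com/TjTheGeek/Pene-Test | test.py | noneType
-- ===== SOURCE A (Python) =====
-- def noneType(list):  # removes every appearance of none
--     noneType = True
--     while noneType:
--         if None in list:
--             list.remove(None)
--         else:
--             noneType = False
--     return list
-- ===== SOURCE B (Python) =====
-- def noneType(list):  # removes every appearance of none
--     # single forward pass: compact non-None items to the front in place, then truncate
--     w = 0
--     for i in range(len(list)):
--         x = list[i]
--         if x != None:
--             list[w] = x
--             w += 1
--     del list[w:]
--     return list
-- ===== Notes on version B (the rewrite author's own statement) =====
-- stated objective: faster
-- what changed: A repeatedly rescans the list (None in list) and calls list.remove(None) until no None remains (quadratic); B compacts the list in one forward pass with a write index and truncates the tail, mutating the same list object.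
import Mathlib
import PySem

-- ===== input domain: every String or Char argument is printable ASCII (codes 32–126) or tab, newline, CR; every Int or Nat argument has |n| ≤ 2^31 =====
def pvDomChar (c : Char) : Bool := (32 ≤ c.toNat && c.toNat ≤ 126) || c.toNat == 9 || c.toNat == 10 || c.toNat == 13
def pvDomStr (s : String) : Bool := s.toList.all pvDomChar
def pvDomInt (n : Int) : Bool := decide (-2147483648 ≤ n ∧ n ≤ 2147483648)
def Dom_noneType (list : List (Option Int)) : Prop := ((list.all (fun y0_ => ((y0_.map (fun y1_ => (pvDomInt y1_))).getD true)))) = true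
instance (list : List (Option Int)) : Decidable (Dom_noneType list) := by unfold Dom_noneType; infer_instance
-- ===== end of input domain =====

-- B compacts the list in one forward pass instead of A's repeated scan-and-remove (faster).
-- Both Pythons mutate the argument list in place and return the same object; the equivalence
-- proved here is about the returned value.

-- ===== PORT A =====
-- while noneType: if None in list: list.remove(None) else: break
-- (list.remove(None) with None ∈ list removes the first occurrence = List.erase, per
-- PySem.List.remove?_eq_some_erase)
def noneTypeLoop (l : List (Option Int)) : List (Option Int) :=
  if h' : none ∈ l then noneTypeLoop (l.erase none) else l
  termination_by l.length
  decreasing_by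
    have := List.length_erase_of_mem h'
    have : 0 < l.length := List.length_pos_of_mem h'
    omega

-- the returned list contains no None, so its elements are the Ints (type conversion at return)
def noneType (list : List (Option Int)) : List Int :=
  (noneTypeLoop list).reduceOption

-- ===== PORT B =====
-- w/write-index compaction: the accumulator is list[:w], the written prefix; del list[w:] keeps it
def noneType_alt (list : List (Option Int)) : List Int :=
  (PySem.List.pyRange 0 (list.length : Int) 1).foldl
    (fun kept i =>
      match PySem.List.pyGet? list i with
      | some (some v) => kept ++ [v]    -- list[w] = list[i]; w += 1
      | _ => kept) []

-- ===== PRECONDITION & SPEC =====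
def Spec_noneType (list : List (Option Int)) (out : List Int) : Prop := out = noneType_alt list
instance (list : List (Option Int)) (out : List Int) : Decidable (Spec_noneType list out) := by unfold Spec_noneType; infer_instance

-- ===== CLAIM (what is proved, stated in full; the proofs are below) =====
def Claim_equal_noneType : Prop := ∀ (list : List (Option Int)), Dom_noneType list → Spec_noneType list (noneType list)

-- ===== LEMMAS AND PROOFS =====

theorem reduceOption_erase_none (l : List (Option Int)) :
    (l.erase none).reduceOption = l.reduceOption := by
  induction l with
  | nil => rfl
  | cons x t ih =>
    cases x with
    | none => simp
    | some a => simp [List.reduceOption_cons_of_some, ih]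

theorem noneTypeLoop_reduceOption (l : List (Option Int)) :
    (noneTypeLoop l).reduceOption = l.reduceOption := by
  fun_induction noneTypeLoop l with
  | case1 l h ih => rw [ih, reduceOption_erase_none]
  | case2 l h => rfl

theorem alt_step (l : List (Option Int)) :
    noneType_alt l =
      (PySem.List.pyRange 0 (l.length : Int) 1).flatMap
        (fun i => match PySem.List.pyGet? l i with
                  | some (some v) => [v]
                  | _ => []) := by
  unfold noneType_alt
  have hf : (fun (kept : List Int) (i : Int) =>
      match PySem.List.pyGet? l i with
      | some (some v) => kept ++ [v]
      | _ => kept) =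
      (fun kept i => kept ++ (match PySem.List.pyGet? l i with
      | some (some v) => [v]
      | _ => [])) := by
    funext kept i
    rcases h : PySem.List.pyGet? l i with _ | (_ | v) <;> simp
  rw [hf, PySem.List.foldl_append_eq_flatMap]
  simp

theorem noneType_alt_eq_reduceOption (l : List (Option Int)) :
    noneType_alt l = l.reduceOption := by
  rw [alt_step]
  induction l using List.reverseRecOn with
  | nil => simp
  | append_singleton l x ih =>
    have hlen : ((l ++ [x]).length : Int) = (l.length : Int) + 1 := by
      simp
    rw [hlen, PySem.List.pyRange_one_succ_right (by positivity), List.flatMap_append,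
        List.reduceOption_append]
    have h1 : (PySem.List.pyRange 0 (l.length : Int) 1).flatMap
        (fun i => match PySem.List.pyGet? (l ++ [x]) i with
                  | some (some v) => [v]
                  | _ => []) = l.reduceOption := by
      rw [← ih]
      apply List.flatMap_congr
      intro i hi
      have hm := (PySem.List.mem_pyRange_one).1 hi
      have hget : PySem.List.pyGet? (l ++ [x]) i = PySem.List.pyGet? l i := by
        rw [PySem.List.pyGet?_of_nonneg (l ++ [x]) hm.1, PySem.List.pyGet?_of_nonneg l hm.1]
        have : i.toNat < l.length := by omega
        rw [List.getElem?_append_left this]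
      rw [hget]
    have h2 : PySem.List.pyGet? (l ++ [x]) (l.length : Int) = some x := by
      rw [PySem.List.pyGet?_natCast]
      simp
    rw [h1, List.flatMap_cons, List.flatMap_nil, h2]
    cases x <;> simp

-- ===== VERDICT (by name: the statement is the Claim_ definition above) =====
theorem noneType_spec : Claim_equal_noneType := by
  intro l _
  unfold Spec_noneType
  rw [noneType_alt_eq_reduceOption]
  unfold noneType
  rw [noneTypeLoop_reduceOption]
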